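-- pv_equiv track=rewrite | github.com/Solomka-0/VK_VSUET_Assistant | rewriter.py | del_spaces
-- ===== SOURCE A (Python) =====
-- def del_spaces(array_of_words):
--     i = 0
--     while i < len(array_of_words):
--         if array_of_words[i] == '':
--             array_of_words.pop(i)
--             i -= 1
--         i += 1
--     return array_of_words
-- ===== SOURCE B (Python) =====
-- def del_spaces(array_of_words):
--     w = 0
--     for r in range(len(array_of_words)):
--         if array_of_words[r] != '':
--             array_of_words[w] = array_of_words[r]
--             w += 1
--     del array_of_words[w:]
--     return array_of_words
-- ===== Notes on version B (the rewrite author's own statement) =====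
-- stated objective: alternative
-- what changed: Replaces the pop(i)-and-rewind-index loop with a single in-place two-pointer compaction pass (write index w, copy non-empty items forward, truncate the tail), keeping the same mutate-in-place-and-return semantics.
import Mathlib
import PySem

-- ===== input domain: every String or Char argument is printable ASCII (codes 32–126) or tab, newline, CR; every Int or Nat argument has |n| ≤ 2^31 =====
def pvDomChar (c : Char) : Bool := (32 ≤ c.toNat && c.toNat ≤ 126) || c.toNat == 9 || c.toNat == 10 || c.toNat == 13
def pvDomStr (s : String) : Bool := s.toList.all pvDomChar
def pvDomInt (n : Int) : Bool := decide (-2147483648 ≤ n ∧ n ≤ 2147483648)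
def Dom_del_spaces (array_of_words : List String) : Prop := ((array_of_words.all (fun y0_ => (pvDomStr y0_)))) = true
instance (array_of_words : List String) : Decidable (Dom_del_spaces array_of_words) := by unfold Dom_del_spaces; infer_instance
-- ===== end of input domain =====

-- B replaces A's pop(i)-and-rewind loop by a single two-pointer compaction pass (same in-place
-- mutation and return of the same list object; the equivalence proved here is about the return value).

-- ===== PORT A =====
-- while i < len: if a[i] == '': a.pop(i); i -= 1; i += 1
def delA_loop (array_of_words : List String) (i : Nat) : List String :=
  if h : i < array_of_words.length then
    if array_of_words[i] = "" then
      match hp : PySem.List.pop? array_of_words (i : Int) with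
      | some (_, rest) => delA_loop rest i        -- i -= 1 then i += 1: net unchanged
      | none => array_of_words                    -- unreachable: i < len
    else delA_loop array_of_words (i + 1)
  else array_of_words
termination_by array_of_words.length - i
decreasing_by
  · have h2 : rest.length + 1 = array_of_words.length :=
      PySem.List.length_of_pop?_eq_some array_of_words hp
    omega
  · omega

def del_spaces (array_of_words : List String) : List String :=
  delA_loop array_of_words 0

-- ===== PORT B =====
-- w = 0; for r in range(len(a)): if a[r] != '': a[w] = a[r]; w += 1
-- del a[w:]; return a
def delB_step (st : List String × Nat) (r : Int) : List String × Nat :=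
  let x := PySem.List.pyGetD st.1 r ""
  if x ≠ "" then (PySem.List.pySetD st.1 (st.2 : Int) x, st.2 + 1) else st

def del_spaces_alt (array_of_words : List String) : List String :=
  let s := (PySem.List.pyRange 0 (PySem.List.len array_of_words) 1).foldl delB_step
             (array_of_words, 0)
  s.1.take s.2

-- ===== PRECONDITION & SPEC =====
def Spec_del_spaces (array_of_words : List String) (out : List String) : Prop := out = del_spaces_alt array_of_words
instance (array_of_words : List String) (out : List String) : Decidable (Spec_del_spaces array_of_words out) := by unfold Spec_del_spaces; infer_instance

-- ===== CLAIM (what is proved, stated in full; the proofs are below) =====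
def Claim_equal_del_spaces : Prop := ∀ (array_of_words : List String), Dom_del_spaces array_of_words → Spec_del_spaces array_of_words (del_spaces array_of_words)

-- ===== LEMMAS AND PROOFS =====

-- A's loop keeps the first i elements and filters the rest.
theorem delA_loop_eq (xs : List String) (i : Nat) :
    delA_loop xs i = xs.take i ++ (xs.drop i).filter (fun s => !(s == "")) := by
  induction xs, i using delA_loop.induct with
  | case1 xs i h heq x rest hp ih =>
    rw [delA_loop, dif_pos h, if_pos heq, hp]
    show delA_loop rest i = _
    rw [ih]
    rw [PySem.List.pop?_natCast xs i h] at hp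
    injection hp with hp; cases hp
    rw [List.eraseIdx_eq_take_drop_succ,
        List.take_append_of_le_length (by simp; omega), List.take_take, min_self,
        List.drop_append_of_le_length (by simp; omega), List.drop_take]
    have hdi : xs.drop i = xs[i] :: xs.drop (i + 1) := List.drop_eq_getElem_cons h
    rw [hdi, List.filter_cons]
    simp [heq]
  | case2 xs i h heq hp =>
    exact absurd (PySem.List.pop?_natCast xs i h ▸ hp) (by simp)
  | case3 xs i h heq ih =>
    rw [delA_loop, dif_pos h, if_neg heq, ih]
    have hdi : xs.drop i = xs[i] :: xs.drop (i + 1) := List.drop_eq_getElem_cons h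
    have hti : xs.take (i + 1) = xs.take i ++ [xs[i]] := by
      rw [List.take_add_one, List.getElem?_eq_getElem h]; rfl
    rw [hdi, List.filter_cons]
    simp [heq]
    rw [hti, List.append_assoc]
    rfl
  | case4 xs i h =>
    rw [delA_loop, dif_neg h,
        List.take_of_length_le (by omega : xs.length ≤ i),
        List.drop_eq_nil_of_le (by omega : xs.length ≤ i)]
    simp

-- B's invariant: processing indices r, r+1, …, n-1 from a state whose first w slots hold the
-- filtered prefix and whose slots from r on still hold xs's tail yields the filtered list.
theorem delB_inv (xs : List String) :
    ∀ (k r : Nat) (lst : List String) (w : Nat),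
      r + k = xs.length → w ≤ r → lst.length = xs.length →
      lst.take w = (xs.take r).filter (fun s => !(s == "")) →
      lst.drop r = xs.drop r →
      (let s := ((List.range' r k).map (fun (n : Nat) => (n : Int))).foldl delB_step (lst, w)
       s.1.take s.2) = xs.filter (fun s => !(s == "")) := by
  intro k
  induction k with
  | zero =>
    intro r lst w hr hw hlen htake _
    simp only [List.range'_zero, List.map_nil, List.foldl_nil]
    have hrn : r = xs.length := by omega
    rw [htake, hrn, List.take_length]
  | succ k ih =>
    intro r lst w hr hw hlen htake hdrop
    have hrlt : r < xs.length := by omega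
    have hrlt' : r < lst.length := by omega
    rw [List.range'_succ]
    simp only [List.map_cons, List.foldl_cons]
    have hget : PySem.List.pyGetD lst (r : Int) "" = lst[r] := by
      rw [PySem.List.pyGetD_natCast]; exact List.getD_eq_getElem lst "" hrlt'
    have hlr : lst[r] = xs[r] := by
      have h0 : (lst.drop r)[0]'(by simp; omega) = (xs.drop r)[0]'(by simp; omega) := by
        simp only [hdrop]
      simpa using h0
    have hdropsucc : lst.drop (r + 1) = xs.drop (r + 1) := by
      have h1 := congrArg (List.drop 1) hdrop
      simpa [List.drop_drop, Nat.add_comm] using h1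
    have htakesucc : xs.take (r + 1) = xs.take r ++ [xs[r]] := by
      rw [List.take_add_one, List.getElem?_eq_getElem hrlt]; rfl
    by_cases hx : lst[r] = ""
    · -- skipped element
      have hstep : delB_step (lst, w) (r : Int) = (lst, w) := by
        simp [delB_step, hget, hx]
      rw [hstep]
      refine ih (r + 1) lst w (by omega) (by omega) hlen ?_ hdropsucc
      have hx' : xs[r] = "" := hlr ▸ hx
      rw [htakesucc, List.filter_append, List.filter_cons]
      simp [htake, hx']
    · -- kept element: write it at w
      have hwlt : w < lst.length := by omega
      have hstep : delB_step (lst, w) (r : Int) = (lst.set w lst[r], w + 1) := by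
        simp [delB_step, hget, hx, PySem.List.pySetD_natCast]
      rw [hstep]
      refine ih (r + 1) (lst.set w lst[r]) (w + 1) (by omega) (by omega) (by simp [hlen]) ?_ ?_
      · have hx' : ¬ xs[r] = "" := hlr ▸ hx
        rw [List.take_add_one, List.getElem?_set_self (by simpa using hwlt),
            List.take_set, List.set_eq_of_length_le (by rw [List.length_take]; omega),
            htake, htakesucc, List.filter_append, List.filter_cons]
        simp [hx', hlr]
      · rw [List.drop_set_of_lt (by omega), hdropsucc]

theorem del_spaces_alt_eq (xs : List String) :
    del_spaces_alt xs = xs.filter (fun s => !(s == "")) := by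
  unfold del_spaces_alt
  have hr : PySem.List.pyRange 0 (PySem.List.len xs) 1
      = (List.range' 0 xs.length).map (fun (n : Nat) => (n : Int)) := by
    rw [PySem.List.len_eq, PySem.List.pyRange_zero_natCast, List.range_eq_range']
  rw [hr]
  exact delB_inv xs xs.length 0 xs 0 (by omega) (by omega) rfl (by simp) rfl

-- ===== VERDICT (by name: the statement is the Claim_ definition above) =====
theorem del_spaces_spec : Claim_equal_del_spaces := by
  intro xs _
  show del_spaces xs = del_spaces_alt xs
  rw [del_spaces, delA_loop_eq, del_spaces_alt_eq]
  simp
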